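-- pv_equiv track=rewrite | github.com/denisvoisnis/heart-dysfunction-monitoring | functions/detectors/Resample.py | byte_to_short
-- ===== SOURCE A (Python) =====
-- def byte_to_short(data, length, reduce_stereo):
--     if reduce_stereo:
--         short_data = []
--         for i in range(0, len(data), 4):
--             val1 = (data[i + 1] << 8) | data[i]
--             val2 = (data[i + 3] << 8) | data[i + 2]
--             short_data.append(((val1 + val2) // 2) & 0xFFFF)  # Ensure 16-bit overflow
--         return short_data
--     else:
--         return [((data[i + 1] << 8) | data[i]) & 0xFFFF for i in range(0, len(data), 2)]
-- ===== SOURCE B (Python) =====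
-- def byte_to_short(data, length, reduce_stereo):
--     # One linear pass builds all (unmasked) 16-bit words, then either mask
--     # them directly or average adjacent pairs in a second pass.
--     vals = [(data[i + 1] << 8) | data[i] for i in range(0, len(data), 2)]
--     if reduce_stereo:
--         return [((vals[i] + vals[i + 1]) // 2) & 0xFFFF
--                 for i in range(0, len(vals), 2)]
--     return [v & 0xFFFF for v in vals]
-- ===== Notes on version B (the rewrite author's own statement) =====
-- stated objective: alternative
-- what changed: Replaces A's fused extract-and-average stereo loop by two differently-shaped passes: one pass extracting every 16-bit word, then a pass that either masks them or averages adjacent word pairs.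
import Mathlib
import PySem

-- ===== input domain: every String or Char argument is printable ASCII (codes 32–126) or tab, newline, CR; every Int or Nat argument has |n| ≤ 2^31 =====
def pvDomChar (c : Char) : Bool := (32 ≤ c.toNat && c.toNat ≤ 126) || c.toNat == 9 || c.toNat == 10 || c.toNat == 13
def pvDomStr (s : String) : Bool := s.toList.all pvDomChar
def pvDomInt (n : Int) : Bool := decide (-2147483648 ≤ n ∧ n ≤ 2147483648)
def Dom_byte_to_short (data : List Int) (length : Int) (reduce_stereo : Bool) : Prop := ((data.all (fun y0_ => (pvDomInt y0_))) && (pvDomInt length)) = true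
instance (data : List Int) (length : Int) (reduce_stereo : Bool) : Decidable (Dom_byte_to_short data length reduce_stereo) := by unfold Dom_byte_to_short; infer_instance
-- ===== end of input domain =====

-- B builds the full 16-bit word list in one pass, then masks or pair-averages it in a second pass
-- (A fuses extraction and averaging in one stride-4 index loop); objective: alternative decomposition.


-- ===== PORT A =====
def byte_to_short (data : List Int) (length : Int) (reduce_stereo : Bool) : List Int :=
  if reduce_stereo then
    (PySem.List.pyRange 0 (data.length : Int) 4).foldl (fun short_data i =>
      let val1 := PySem.Int.bor (PySem.List.pyGetD data (i + 1) 0 <<< (8 : Int)) (PySem.List.pyGetD data i 0)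
      let val2 := PySem.Int.bor (PySem.List.pyGetD data (i + 3) 0 <<< (8 : Int)) (PySem.List.pyGetD data (i + 2) 0)
      short_data ++ [PySem.Int.band (PySem.Int.floordiv (val1 + val2) 2) 0xFFFF]) []
  else
    (PySem.List.pyRange 0 (data.length : Int) 2).map (fun i =>
      PySem.Int.band (PySem.Int.bor (PySem.List.pyGetD data (i + 1) 0 <<< (8 : Int)) (PySem.List.pyGetD data i 0)) 0xFFFF)

-- ===== PORT B =====
def byte_to_short_alt (data : List Int) (length : Int) (reduce_stereo : Bool) : List Int :=
  let vals := (PySem.List.pyRange 0 (data.length : Int) 2).map (fun i =>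
    PySem.Int.bor (PySem.List.pyGetD data (i + 1) 0 <<< (8 : Int)) (PySem.List.pyGetD data i 0))
  if reduce_stereo then
    (PySem.List.pyRange 0 (vals.length : Int) 2).map (fun i =>
      PySem.Int.band (PySem.Int.floordiv (PySem.List.pyGetD vals i 0 + PySem.List.pyGetD vals (i + 1) 0) 2) 0xFFFF)
  else
    vals.map (fun v => PySem.Int.band v 0xFFFF)

-- ===== PRECONDITION & SPEC =====
-- Pre_ excludes exactly the inputs where A raises IndexError: a byte count not divisible by
-- 4 (stereo) resp. 2 (mono).
def Pre_byte_to_short (data : List Int) (length : Int) (reduce_stereo : Bool) : Prop :=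
  if reduce_stereo then 4 ∣ data.length else 2 ∣ data.length
instance (data : List Int) (length : Int) (reduce_stereo : Bool) : Decidable (Pre_byte_to_short data length reduce_stereo) := by unfold Pre_byte_to_short; infer_instance
def pvWitness_byte_to_short : List Int × Int × Bool := ([1, 2, 3, 4], 0, true)

def Spec_byte_to_short (data : List Int) (length : Int) (reduce_stereo : Bool) (out : List Int) : Prop := out = byte_to_short_alt data length reduce_stereo
instance (data : List Int) (length : Int) (reduce_stereo : Bool) (out : List Int) : Decidable (Spec_byte_to_short data length reduce_stereo out) := by unfold Spec_byte_to_short; infer_instance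

-- ===== CLAIM (what is proved, stated in full; the proofs are below) =====
def Claim_equal_byte_to_short : Prop := ∀ (data : List Int) (length : Int) (reduce_stereo : Bool), Dom_byte_to_short data length reduce_stereo → Pre_byte_to_short data length reduce_stereo → Spec_byte_to_short data length reduce_stereo (byte_to_short data length reduce_stereo)

-- ===== LEMMAS AND PROOFS =====

-- chunked recursions used only as proof intermediaries
def pvPairs (f : Int → Int → Int) : List Int → List Int
  | a :: b :: rest => f a b :: pvPairs f rest
  | _ => []

def pvQuads (g : Int → Int → Int → Int → Int) : List Int → List Int
  | a :: b :: c :: d :: rest => g a b c d :: pvQuads g rest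
  | _ => []

theorem pvRange_shift (a b s c : Int) (hs : 0 < s) :
    PySem.List.pyRange (a + c) (b + c) s = (PySem.List.pyRange a b s).map (· + c) := by
  rw [PySem.List.pyRange_of_pos _ _ hs, PySem.List.pyRange_of_pos _ _ hs, List.map_map]
  have h1 : (a + c < b + c) ↔ (a < b) := by omega
  have h2 : b + c - (a + c) = b - a := by ring
  simp only [h1, h2]
  apply List.map_congr_left
  intro k _
  simp; ring

theorem pvRange_cons (a b s : Int) (hs : 0 < s) (h : a < b) :
    PySem.List.pyRange a b s = a :: PySem.List.pyRange (a + s) b s := by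
  rw [PySem.List.pyRange_of_pos _ _ hs, PySem.List.pyRange_of_pos _ _ hs]
  by_cases h2 : a + s < b
  · have key : b - a + s - 1 = (b - (a + s) + s - 1) + 1 * s := by ring
    have hnn : 0 ≤ (b - (a + s) + s - 1) / s := Int.ediv_nonneg (by omega) (by omega)
    have hN : (if a < b then ((b - a + s - 1) / s).toNat else 0)
        = (if a + s < b then ((b - (a + s) + s - 1) / s).toNat else 0) + 1 := by
      rw [if_pos h, if_pos h2, key, Int.add_mul_ediv_right _ _ (by omega : s ≠ 0)]
      omega
    rw [hN, List.range_succ_eq_map, List.map_cons, List.map_map]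
    refine congrArg₂ _ (by simp) ?_
    apply List.map_congr_left
    intro k _
    simp [Function.comp]

    ring
  · have key : b - a + s - 1 = (b - a - 1) + 1 * s := by ring
    have hz : (b - a - 1) / s = 0 := Int.ediv_eq_zero_of_lt (by omega) (by omega)
    have hN : (if a < b then ((b - a + s - 1) / s).toNat else 0) = 1 := by
      rw [if_pos h, key, Int.add_mul_ediv_right _ _ (by omega : s ≠ 0), hz]
      rfl
    rw [hN, if_neg h2]
    simp

theorem pvGetD_cons_succ (x : Int) (xs : List Int) (i : Int) (d : Int) (hi : 0 ≤ i) :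
    PySem.List.pyGetD (x :: xs) (i + 1) d = PySem.List.pyGetD xs i d := by
  unfold PySem.List.pyGetD PySem.List.pyGet? PySem.List.pyIdx?
  rw [if_pos (by omega : (0:Int) ≤ i + 1), if_pos hi]
  by_cases h : i < (xs.length : Int)
  · rw [if_pos (by simp; omega), if_pos (by exact_mod_cast h)]
    have ht : (i + 1).toNat = i.toNat + 1 := by omega
    rw [ht]
    simp
  · rw [if_neg (by simp; omega), if_neg h]
    rfl

theorem pvL2 (f : Int → Int → Int) : ∀ (data : List Int), 2 ∣ data.length →
    (PySem.List.pyRange 0 (data.length : Int) 2).map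
      (fun i => f (PySem.List.pyGetD data i 0) (PySem.List.pyGetD data (i + 1) 0))
      = pvPairs f data
  | [], _ => by
    rw [PySem.List.pyRange_of_pos _ _ (by norm_num)]
    simp [pvPairs]
  | [a], h => by simp at h
  | a :: b :: rest, h => by
    have hr : 2 ∣ rest.length := by simpa using h
    have hlen : ((a :: b :: rest).length : Int) = (rest.length : Int) + 2 := by
      simp; ring
    rw [hlen, pvRange_cons 0 ((rest.length : Int) + 2) 2 (by norm_num) (by omega),
      List.map_cons]
    have hsh : PySem.List.pyRange (0 + 2) ((rest.length : Int) + 2) 2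
        = (PySem.List.pyRange 0 (rest.length : Int) 2).map (· + 2) := by
      exact pvRange_shift 0 (rest.length : Int) 2 2 (by norm_num)
    rw [show (0 : Int) + 2 = 0 + 2 from rfl] at hsh
    rw [hsh, List.map_map]
    have hhead : f (PySem.List.pyGetD (a :: b :: rest) 0 0)
        (PySem.List.pyGetD (a :: b :: rest) (0 + 1) 0) = f a b := by
      rw [PySem.List.pyGetD_zero_cons, show (0 : Int) + 1 = 0 + 1 from rfl,
        pvGetD_cons_succ _ _ _ _ (by norm_num), PySem.List.pyGetD_zero_cons]
    rw [hhead, pvPairs]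
    refine congrArg _ ?_
    rw [← pvL2 f rest hr]
    apply List.map_congr_left
    intro i hi
    have h0 : 0 ≤ i := ((PySem.List.mem_pyRange_iff_of_pos (by norm_num) i).mp hi).1
    simp only [Function.comp]
    have e1 : i + 2 = (i + 1) + 1 := by ring
    have e2 : i + 2 + 1 = (i + 2) + 1 := by ring
    rw [e1, pvGetD_cons_succ _ _ _ _ (by omega), pvGetD_cons_succ _ _ _ _ h0,
      show (i + 1) + 1 + 1 = (i + 2) + 1 from by ring,
      show i + 2 = (i + 1) + 1 from by ring,
      pvGetD_cons_succ _ _ _ _ (by omega), pvGetD_cons_succ _ _ _ _ (by omega)]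

theorem pvL4 (g : Int → Int → Int → Int → Int) : ∀ (data : List Int), 4 ∣ data.length →
    (PySem.List.pyRange 0 (data.length : Int) 4).map
      (fun i => g (PySem.List.pyGetD data i 0) (PySem.List.pyGetD data (i + 1) 0)
                  (PySem.List.pyGetD data (i + 2) 0) (PySem.List.pyGetD data (i + 3) 0))
      = pvQuads g data
  | [], _ => by
    rw [PySem.List.pyRange_of_pos _ _ (by norm_num)]
    simp [pvQuads]
  | [a], h => by simp at h
  | [a, b], h => by simp at h
  | [a, b, c], h => by simp at h
  | a :: b :: c :: d :: rest, h => by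
    have hr : 4 ∣ rest.length := by simp at h; omega
    have hlen : ((a :: b :: c :: d :: rest).length : Int) = (rest.length : Int) + 4 := by
      simp; ring
    rw [hlen, pvRange_cons 0 ((rest.length : Int) + 4) 4 (by norm_num) (by omega),
      List.map_cons]
    have hsh : PySem.List.pyRange (0 + 4) ((rest.length : Int) + 4) 4
        = (PySem.List.pyRange 0 (rest.length : Int) 4).map (· + 4) :=
      pvRange_shift 0 (rest.length : Int) 4 4 (by norm_num)
    rw [hsh, List.map_map]
    have step : ∀ (x : Int) (xs : List Int) (j : Int), 0 ≤ j →
        PySem.List.pyGetD (x :: xs) (j + 1) 0 = PySem.List.pyGetD xs j 0 :=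
      fun x xs j hj => pvGetD_cons_succ x xs j 0 hj
    have hhead : g (PySem.List.pyGetD (a :: b :: c :: d :: rest) 0 0)
        (PySem.List.pyGetD (a :: b :: c :: d :: rest) (0 + 1) 0)
        (PySem.List.pyGetD (a :: b :: c :: d :: rest) (0 + 2) 0)
        (PySem.List.pyGetD (a :: b :: c :: d :: rest) (0 + 3) 0) = g a b c d := by
      rw [PySem.List.pyGetD_zero_cons,
        step a _ 0 le_rfl, PySem.List.pyGetD_zero_cons,
        show (0 : Int) + 2 = (0 + 1) + 1 from by ring,
        step a _ (0 + 1) (by norm_num), step b _ 0 le_rfl, PySem.List.pyGetD_zero_cons,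
        show (0 : Int) + 3 = ((0 + 1) + 1) + 1 from by ring,
        step a _ ((0 + 1) + 1) (by norm_num), step b _ (0 + 1) (by norm_num),
        step c _ 0 le_rfl, PySem.List.pyGetD_zero_cons]
    rw [hhead, pvQuads]
    refine congrArg _ ?_
    rw [← pvL4 g rest hr]
    apply List.map_congr_left
    intro i hi
    have h0 : 0 ≤ i := ((PySem.List.mem_pyRange_iff_of_pos (by norm_num) i).mp hi).1
    simp only [Function.comp]
    have drop4 : ∀ (j : Int), 0 ≤ j →
        PySem.List.pyGetD (a :: b :: c :: d :: rest) (j + 4) 0 = PySem.List.pyGetD rest j 0 := by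
      intro j hj
      rw [show j + 4 = (j + 3) + 1 from by ring, step a _ _ (by omega),
        show j + 3 = (j + 2) + 1 from by ring, step b _ _ (by omega),
        show j + 2 = (j + 1) + 1 from by ring, step c _ _ (by omega),
        step d _ _ hj]
    rw [drop4 i h0,
      show i + 4 + 1 = (i + 1) + 4 from by ring, drop4 (i + 1) (by omega),
      show i + 4 + 2 = (i + 2) + 4 from by ring, drop4 (i + 2) (by omega),
      show i + 4 + 3 = (i + 3) + 4 from by ring, drop4 (i + 3) (by omega)]

theorem pvPairs_length (f : Int → Int → Int) : ∀ (data : List Int), 2 ∣ data.length →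
    2 * (pvPairs f data).length = data.length
  | [], _ => by simp [pvPairs]
  | [a], h => by simp at h
  | a :: b :: rest, h => by
    have hr : 2 ∣ rest.length := by simpa using h
    have := pvPairs_length f rest hr
    simp [pvPairs]
    omega

theorem pvPairs_pairs (f g2 : Int → Int → Int) : ∀ (data : List Int), 4 ∣ data.length →
    pvPairs g2 (pvPairs f data) = pvQuads (fun a b c d => g2 (f a b) (f c d)) data
  | [], _ => by simp [pvPairs, pvQuads]
  | [a], h => by simp at h
  | [a, b], h => by simp at h
  | [a, b, c], h => by simp at h
  | a :: b :: c :: d :: rest, h => by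
    have hr : 4 ∣ rest.length := by simp at h; omega
    rw [show pvPairs f (a :: b :: c :: d :: rest) = f a b :: f c d :: pvPairs f rest from rfl,
      show ∀ u v t, pvPairs g2 (u :: v :: t) = g2 u v :: pvPairs g2 t from fun _ _ _ => rfl,
      pvQuads, pvPairs_pairs f g2 rest hr]

-- ===== VERDICT (by name: the statement is the Claim_ definition above) =====
theorem byte_to_short_spec : Claim_equal_byte_to_short := by
  intro data length reduce_stereo _ hpre
  unfold Spec_byte_to_short byte_to_short byte_to_short_alt
  cases reduce_stereo with
  | false =>
    have h2 : 2 ∣ data.length := by simpa [Pre_byte_to_short] using hpre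
    simp only [Bool.false_eq_true, if_false, List.map_map]
    rw [pvL2 (fun u v => PySem.Int.band (PySem.Int.bor (v <<< (8 : Int)) u) 0xFFFF) data h2,
      ← pvL2 (fun u v => PySem.Int.band (PySem.Int.bor (v <<< (8 : Int)) u) 0xFFFF) data h2]
    rfl
  | true =>
    have h4 : 4 ∣ data.length := by simpa [Pre_byte_to_short] using hpre
    have h2 : 2 ∣ data.length := dvd_trans (by norm_num) h4
    simp only [if_true, PySem.List.foldl_append_singleton_eq_map, List.nil_append]
    rw [pvL2 (fun u v => PySem.Int.bor (v <<< (8 : Int)) u) data h2]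
    have hv2 : 2 ∣ (pvPairs (fun u v => PySem.Int.bor (v <<< (8 : Int)) u) data).length := by
      have := pvPairs_length (fun u v => PySem.Int.bor (v <<< (8 : Int)) u) data h2
      omega
    rw [pvL2 (fun u v => PySem.Int.band (PySem.Int.floordiv (u + v) 2) 0xFFFF) _ hv2,
      pvPairs_pairs _ _ data h4,
      pvL4 (fun a b c d => PySem.Int.band (PySem.Int.floordiv
        (PySem.Int.bor (b <<< (8 : Int)) a + PySem.Int.bor (d <<< (8 : Int)) c) 2) 0xFFFF) data h4]
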